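-- pv_equiv track=rewrite | github.com/ToniCaimari/Codewars | kyu8/Remove_the_time.py | shorten_to_date
-- ===== SOURCE A (Python) =====
-- def shorten_to_date(long_date):
--     result = ''
--     for i in long_date:
--         if i != ',':
--             result += i
--         else:
--             break
--     return result
-- ===== SOURCE B (Python) =====
-- def shorten_to_date(long_date):
--     idx = long_date.find(',')
--     if idx != -1:
--         return long_date[:idx]
--     return long_date
-- ===== Notes on version B (the rewrite author's own statement) =====
-- stated objective: idiomatic
-- what changed: Replaces A's per-character loop with break and quadratic string accumulation by locating the first comma with str.find and returning one slice (or the whole string when there is no comma).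
import Mathlib
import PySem

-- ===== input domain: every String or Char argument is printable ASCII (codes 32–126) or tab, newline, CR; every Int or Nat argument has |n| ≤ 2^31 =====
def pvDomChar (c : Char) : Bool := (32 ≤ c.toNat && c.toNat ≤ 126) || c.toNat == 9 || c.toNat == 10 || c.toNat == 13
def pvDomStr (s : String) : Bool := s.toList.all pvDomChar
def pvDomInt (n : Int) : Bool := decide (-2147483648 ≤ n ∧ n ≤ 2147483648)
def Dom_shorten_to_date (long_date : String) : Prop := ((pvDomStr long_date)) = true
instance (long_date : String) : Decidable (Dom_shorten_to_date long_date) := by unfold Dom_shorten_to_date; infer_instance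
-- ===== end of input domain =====

-- B locates the first comma with str.find and returns one slice instead of A's
-- per-character accumulate-until-break loop; return values agree on all inputs.


-- ===== PORT A =====
-- loop 'for i in long_date: if i != ',': result += i else: break' with accumulator result
def shortenLoopA (result : List Char) : List Char → List Char
  | [] => result
  | c :: rest => if c ≠ ',' then shortenLoopA (result ++ [c]) rest else result

def shorten_to_date (long_date : String) : String :=
  String.ofList (shortenLoopA [] long_date.toList)

-- ===== PORT B =====
def shorten_to_date_alt (long_date : String) : String :=
  let idx := PySem.Str.find long_date ","
  if idx ≠ -1 then
    String.ofList (PySem.Chars.slice long_date.toList none (some idx))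
  else long_date

-- ===== PRECONDITION & SPEC =====
def Spec_shorten_to_date (long_date : String) (out : String) : Prop := out = shorten_to_date_alt long_date
instance (long_date : String) (out : String) : Decidable (Spec_shorten_to_date long_date out) := by unfold Spec_shorten_to_date; infer_instance

-- ===== CLAIM (what is proved, stated in full; the proofs are below) =====
def Claim_equal_shorten_to_date : Prop := ∀ (long_date : String), Dom_shorten_to_date long_date → Spec_shorten_to_date long_date (shorten_to_date long_date)

-- ===== LEMMAS AND PROOFS =====

lemma shortenLoopA_eq_takeWhile (acc cs : List Char) :
    shortenLoopA acc cs = acc ++ cs.takeWhile (fun c => c != ',') := by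
  induction cs generalizing acc with
  | nil => simp [shortenLoopA]
  | cons c rest ih =>
    by_cases h : c = ','
    · simp [shortenLoopA, h]
    · rw [shortenLoopA, if_pos (by simp [h]), ih, List.takeWhile_cons, if_pos (by simp [h])]
      simp

lemma singleton_prefix_drop (cs : List Char) (i : Nat) :
    [','] <+: cs.drop i ↔ cs[i]? = some ',' := by
  constructor
  · rintro ⟨t, ht⟩
    have hh : (cs.drop i).head? = some ',' := by rw [← ht]; rfl
    simpa [List.head?_drop] using hh
  · intro h
    have hh : (cs.drop i).head? = some ',' := by simpa [List.head?_drop] using h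
    rcases hd : cs.drop i with _ | ⟨x, xs⟩
    · rw [hd] at hh; simp at hh
    · rw [hd] at hh; simp at hh
      exact ⟨xs, by simp [hh]⟩

lemma takeWhile_eq_take_of (cs : List Char) (n : Nat)
    (h1 : ∀ i, i < n → cs[i]? ≠ some ',')
    (h2 : n = cs.length ∨ cs[n]? = some ',') :
    cs.takeWhile (fun c => c != ',') = cs.take n := by
  induction cs generalizing n with
  | nil => simp
  | cons c rest ih =>
    cases n with
    | zero =>
      rcases h2 with h2 | h2
      · simp at h2
      · simp only [List.getElem?_cons_zero, Option.some.injEq] at h2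
        simp [List.takeWhile, h2]
    | succ m =>
      have hc : c ≠ ',' := by
        have := h1 0 (Nat.succ_pos m); simpa using this
      have ih' := ih m (fun i hi => by
          have := h1 (i+1) (by omega); simpa using this)
        (by rcases h2 with h2 | h2
            · left; simpa using h2
            · right; simpa using h2)
      rw [List.takeWhile_cons, if_pos (by simp [hc]), List.take_succ_cons, ih']

lemma takeWhile_eq_self_of_no_comma (cs : List Char) (h : ¬ [','] <:+: cs) :
    cs.takeWhile (fun c => c != ',') = cs := by
  apply List.takeWhile_eq_self_iff.mpr
  intro c hc
  simp only [bne_iff_ne, ne_eq]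
  intro hcomma
  subst hcomma
  obtain ⟨l₁, l₂, hl⟩ := List.append_of_mem hc
  exact h ⟨l₁, l₂, by simp [hl]⟩

-- ===== VERDICT (by name: the statement is the Claim_ definition above) =====
theorem shorten_to_date_spec : Claim_equal_shorten_to_date := by
  intro s _
  unfold Spec_shorten_to_date shorten_to_date shorten_to_date_alt
  rw [shortenLoopA_eq_takeWhile]
  simp only [List.nil_append, PySem.Str.find_eq]
  have hts : ("," : String).toList = [','] := rfl
  rw [hts]
  by_cases h : PySem.Chars.find s.toList [','] = -1
  · have hinf : ¬ ([','] <:+: s.toList) := (PySem.Chars.find_eq_neg_one_iff _ _).mp h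
    rw [if_neg (by simp [h])]
    rw [takeWhile_eq_self_of_no_comma s.toList hinf]
    exact String.ofList_toList
  · rw [if_pos (by simp [h])]
    have hnn : 0 ≤ PySem.Chars.find s.toList [','] := by
      rcases PySem.Chars.neg_one_le_find s.toList [','] |>.lt_or_eq with hlt | heq
      · omega
      · exact absurd heq.symm h
    obtain ⟨hpre, hmin⟩ := PySem.Chars.find_spec (s := s.toList) (sub := [',']) hnn
    set n := (PySem.Chars.find s.toList [',']).toNat with hn
    have hslice : PySem.Chars.slice s.toList none (some (PySem.Chars.find s.toList [',']))
        = s.toList.take n := by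
      simp only [PySem.Chars.slice_eq_listSlice]
      exact PySem.List.slice_to _ hnn
    rw [hslice]
    congr 1
    apply takeWhile_eq_take_of
    · intro i hi
      have := hmin i hi
      intro hcontra
      exact this ((singleton_prefix_drop s.toList i).mpr (by simpa using hcontra))
    · right
      have : [','] <+: s.toList.drop n := by simpa using hpre
      exact (singleton_prefix_drop s.toList n).mp this
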